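-- pv_equiv track=rewrite | github.com/kselvocki/advent-of-code-2022 | day02/day02part2.py | rps_score
-- ===== SOURCE A (Python) =====
-- def rps_score(plays):
--     rps_game_score = 0
--     for play in plays:
--         if play[1] == "Y":
--             rps_game_score += 3
--         elif play[1] == "Z":
--             rps_game_score += 6
--         else:
--             rps_game_score += 0
--     return rps_game_score
-- ===== SOURCE B (Python) =====
-- def rps_score(plays):
--     seconds = [play[1] for play in plays]
--     return 3 * seconds.count("Y") + 6 * seconds.count("Z")
-- ===== Notes on version B (the rewrite author's own statement) =====
-- stated objective: alternative
-- what changed: Replaces the per-element branch-and-accumulate loop by a tally-then-combine shape: collect the second characters, count 'Y' and 'Z', and return the closed-form 3*countY + 6*countZ.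
import Mathlib
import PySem

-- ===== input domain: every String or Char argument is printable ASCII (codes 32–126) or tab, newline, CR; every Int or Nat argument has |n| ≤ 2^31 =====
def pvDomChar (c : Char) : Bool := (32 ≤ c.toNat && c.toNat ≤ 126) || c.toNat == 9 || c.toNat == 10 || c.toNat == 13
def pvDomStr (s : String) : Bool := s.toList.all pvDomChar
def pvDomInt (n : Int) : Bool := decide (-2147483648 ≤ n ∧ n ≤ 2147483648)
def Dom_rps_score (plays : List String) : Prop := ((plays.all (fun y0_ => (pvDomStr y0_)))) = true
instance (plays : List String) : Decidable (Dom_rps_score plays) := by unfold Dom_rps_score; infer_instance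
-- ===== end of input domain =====

-- B replaces A's branch-and-accumulate loop with a tally of second characters combined in closed form (alternative decomposition, same cost).


-- ===== PORT A =====
def rps_score (plays : List String) : Int :=
  plays.foldl (fun acc play =>
    if PySem.Str.pyGet? play 1 = some 'Y' then acc + 3
    else if PySem.Str.pyGet? play 1 = some 'Z' then acc + 6
    else acc + 0) 0

-- ===== PORT B =====
def rps_score_alt (plays : List String) : Int :=
  let seconds := plays.map (fun play => PySem.Str.pyGet? play 1)
  3 * (PySem.List.count seconds (some 'Y') : Int) + 6 * (PySem.List.count seconds (some 'Z') : Int)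

-- ===== PRECONDITION & SPEC =====
-- Pre_ excludes plays containing a string of length < 2, on which A raises IndexError at play[1].
def Pre_rps_score (plays : List String) : Prop := ∀ p ∈ plays, 2 ≤ p.toList.length
instance (plays : List String) : Decidable (Pre_rps_score plays) := by unfold Pre_rps_score; infer_instance
def pvWitness_rps_score : List String := ["AY", "BZ", "CX"]
def Spec_rps_score (plays : List String) (out : Int) : Prop := out = rps_score_alt plays
instance (plays : List String) (out : Int) : Decidable (Spec_rps_score plays out) := by unfold Spec_rps_score; infer_instance

-- ===== CLAIM (what is proved, stated in full; the proofs are below) =====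
def Claim_equal_rps_score : Prop := ∀ (plays : List String), Dom_rps_score plays → Pre_rps_score plays → Spec_rps_score plays (rps_score plays)

-- ===== LEMMAS AND PROOFS =====
theorem rps_foldl_eq (plays : List String) (acc : Int) :
    plays.foldl (fun acc play =>
      if PySem.Str.pyGet? play 1 = some 'Y' then acc + 3
      else if PySem.Str.pyGet? play 1 = some 'Z' then acc + 6
      else acc + 0) acc
    = acc + 3 * (PySem.List.count (plays.map (fun play => PySem.Str.pyGet? play 1)) (some 'Y') : Int)
        + 6 * (PySem.List.count (plays.map (fun play => PySem.Str.pyGet? play 1)) (some 'Z') : Int) := by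
  induction plays generalizing acc with
  | nil => simp [PySem.List.count]
  | cons h t ih =>
    simp only [List.foldl_cons, List.map_cons, PySem.List.count, List.count_cons]
    rw [ih]
    by_cases hy : PySem.Str.pyGet? h 1 = some 'Y' <;>
      by_cases hz : PySem.Str.pyGet? h 1 = some 'Z' <;>
      simp_all [PySem.List.count] <;> ring

-- ===== VERDICT (by name: the statement is the Claim_ definition above) =====
theorem rps_score_spec : Claim_equal_rps_score := by
  intro plays _ _
  show rps_score plays = rps_score_alt plays
  simp only [rps_score, rps_score_alt, rps_foldl_eq, zero_add]
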